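-- pv_equiv track=rewrite | github.com/markdias/openai | footballer_app.py | _find_first_markdown_table
-- ===== SOURCE A (Python) =====
-- from typing import Dict, Iterable, Optional, TYPE_CHECKING
--
-- def _find_first_markdown_table(markdown: str) -> Optional[tuple[list[str], int, int]]:
--     lines = markdown.splitlines()
--     start: Optional[int] = None
--     table_lines: list[str] = []
--
--     for index, raw_line in enumerate(lines):
--         if raw_line.strip().startswith("|"):
--             if start is None:
--                 start = index
--             table_lines.append(raw_line)
--         elif start is not None:
--             end = index
--             break
--     else:
--         if start is None:
--             return None
--         end = len(lines)
--
--     if start is None or len(table_lines) < 2: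
--         return None
--
--     return table_lines, start, end
-- ===== SOURCE B (Python) =====
-- from typing import Optional
--
--
-- def _find_first_markdown_table(markdown: str) -> Optional[tuple[list[str], int, int]]:
--     lines = markdown.splitlines()
--     # phase 1: find the index of the first line whose stripped form starts with '|'
--     start = None
--     for i, line in enumerate(lines):
--         if line.strip().startswith("|"):
--             start = i
--             break
--     if start is None:
--         return None
--     # phase 2: count how many consecutive lines from start still look like table rows
--     block = lines[start:]
--     k = 0
--     while k < len(block) and block[k].strip().startswith("|"):
--         k += 1
--     if k < 2:
--         return None
--     return block[:k], start, start + k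
-- ===== Notes on version B (the rewrite author's own statement) =====
-- stated objective: simpler
-- what changed: Replaces A's single stateful scan (Optional start, accumulator list, break/for-else end bookkeeping) by two independent phases: find the index of the first pipe-prefixed line, then count the run of consecutive pipe-prefixed lines from there and slice it out.
import Mathlib
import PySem

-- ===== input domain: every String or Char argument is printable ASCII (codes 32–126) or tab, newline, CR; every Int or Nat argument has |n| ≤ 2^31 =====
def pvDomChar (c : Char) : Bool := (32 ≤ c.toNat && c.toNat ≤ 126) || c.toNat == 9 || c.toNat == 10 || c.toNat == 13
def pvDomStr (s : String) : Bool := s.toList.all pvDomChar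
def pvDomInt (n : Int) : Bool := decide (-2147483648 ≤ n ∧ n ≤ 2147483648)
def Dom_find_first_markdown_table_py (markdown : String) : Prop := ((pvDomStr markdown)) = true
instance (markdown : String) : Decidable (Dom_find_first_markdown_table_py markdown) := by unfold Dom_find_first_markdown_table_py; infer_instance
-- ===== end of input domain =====

-- B replaces A's single stateful scan by two phases (find start, then count the run of table lines); same value everywhere.

-- ===== PORT A =====
-- A's for-loop with enumerate/break/else: state = (start, table_lines); result carries
-- start, table_lines, and (some end) iff the loop broke.
def aLoop : List String → Nat → Option Nat → List String → Option Nat × List String × Option Nat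
  | [], _, start, tl => (start, tl, none)
  | l :: rest, i, start, tl =>
    if PySem.Str.startswith (PySem.Str.strip l) "|" then
      aLoop rest (i + 1) (match start with | none => some i | some s => some s) (tl ++ [l])
    else
      match start with
      | some s => (some s, tl, some i)
      | none => aLoop rest (i + 1) none tl

def find_first_markdown_table_py (markdown : String) : Option (List String × Int × Int) :=
  let lines := PySem.Str.splitlines markdown
  match aLoop lines 0 none [] with
  | (none, _, _) => none            -- for-else with start None, or final start-is-None guard
  | (some s, tl, brk) =>
    let e : Nat := match brk with | some e => e | none => lines.length
    if tl.length < 2 then none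
    else some (tl, (s : Int), (e : Int))

-- ===== PORT B =====
-- phase 1 of Source B: first index whose stripped line starts with '|'
def bStart : List String → Nat → Option Nat
  | [], _ => none
  | l :: rest, i => if PySem.Str.startswith (PySem.Str.strip l) "|" then some i else bStart rest (i + 1)

-- phase 2 of Source B: the while loop counting leading table rows of block
def bRun : List String → Nat
  | [] => 0
  | l :: rest => if PySem.Str.startswith (PySem.Str.strip l) "|" then bRun rest + 1 else 0

def find_first_markdown_table_py_alt (markdown : String) : Option (List String × Int × Int) :=
  let lines := PySem.Str.splitlines markdown
  match bStart lines 0 with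
  | none => none
  | some s =>
    let block := lines.drop s
    let k := bRun block
    if k < 2 then none
    else some (block.take k, (s : Int), ((s + k : Nat) : Int))

-- ===== PRECONDITION & SPEC =====
def Spec_find_first_markdown_table_py (markdown : String) (out : Option (List String × Int × Int)) : Prop := out = find_first_markdown_table_py_alt markdown
instance (markdown : String) (out : Option (List String × Int × Int)) : Decidable (Spec_find_first_markdown_table_py markdown out) := by unfold Spec_find_first_markdown_table_py; infer_instance

-- ===== CLAIM (what is proved, stated in full; the proofs are below) =====
def Claim_equal_find_first_markdown_table_py : Prop := ∀ (markdown : String), Dom_find_first_markdown_table_py markdown → Spec_find_first_markdown_table_py markdown (find_first_markdown_table_py markdown)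

-- ===== LEMMAS AND PROOFS =====

-- parameterised post-processing of A's loop result (i = index already consumed)
def aPost (lines : List String) (i : Nat) : Option (List String × Int × Int) :=
  match aLoop lines i none [] with
  | (none, _, _) => none
  | (some s, tl, brk) =>
    let e : Nat := match brk with | some e => e | none => i + lines.length
    if tl.length < 2 then none
    else some (tl, (s : Int), (e : Int))

-- parameterised B result
def bPost (lines : List String) (i : Nat) : Option (List String × Int × Int) :=
  match bStart lines i with
  | none => none
  | some s =>
    let block := lines.drop (s - i)
    let k := bRun block
    if k < 2 then none
    else some (block.take k, (s : Int), ((s + k : Nat) : Int))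

-- phase-2 characterisation of A's loop once start is set
theorem aLoop_some (lines : List String) (i s : Nat) (tl : List String) :
    aLoop lines i (some s) tl =
      (some s, tl ++ lines.take (bRun lines),
        if bRun lines = lines.length then none else some (i + bRun lines)) := by
  induction lines generalizing i tl with
  | nil => simp [aLoop, bRun]
  | cons l rest ih =>
    by_cases h : (PySem.Str.startswith (PySem.Str.strip l) "|") = true
    · have h1 : aLoop (l :: rest) i (some s) tl = aLoop rest (i + 1) (some s) (tl ++ [l]) := by
        simp only [aLoop, h, if_true]
      have h2 : bRun (l :: rest) = bRun rest + 1 := by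
        simp only [bRun, h, if_true]
      rw [h1, ih, h2]
      simp only [List.take_succ_cons, List.length_cons, Prod.mk.injEq, List.append_assoc,
        List.singleton_append]
      refine ⟨by trivial, by trivial, ?_⟩
      split_ifs with ha hb hb
      · rfl
      · omega
      · omega
      · simp only [Option.some.injEq]; omega
    · have h1 : aLoop (l :: rest) i (some s) tl = (some s, tl, some i) := by
        simp only [aLoop]; rw [if_neg h]
      have h2 : bRun (l :: rest) = 0 := by
        simp only [bRun]; rw [if_neg h]
      rw [h1, h2]
      simp

theorem bRun_le (lines : List String) : bRun lines ≤ lines.length := by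
  induction lines with
  | nil => simp [bRun]
  | cons l rest ih =>
    simp only [bRun, List.length_cons]
    split_ifs <;> omega

theorem bStart_le (lines : List String) (i s : Nat) (h : bStart lines i = some s) : i ≤ s := by
  induction lines generalizing i with
  | nil => simp [bStart] at h
  | cons l rest ih =>
    simp only [bStart] at h
    split_ifs at h with hb
    · simp at h; omega
    · have := ih (i + 1) h; omega

set_option maxHeartbeats 1000000 in
theorem aPost_eq_bPost (lines : List String) (i : Nat) : aPost lines i = bPost lines i := by
  induction lines generalizing i with
  | nil => simp [aPost, bPost, aLoop, bStart]
  | cons l rest ih =>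
    by_cases h : (PySem.Str.startswith (PySem.Str.strip l) "|") = true
    · -- first table line found at index i: A enters accumulation, B finds start = i
      have hble := bRun_le rest
      have hlen : (l :: rest.take (bRun rest)).length = bRun rest + 1 := by
        simp [List.length_take]
        omega
      have hA : aPost (l :: rest) i =
          (if bRun rest + 1 < 2 then none
           else some (l :: rest.take (bRun rest), (i : Int), ((i + 1 + bRun rest : Nat) : Int))) := by
        have h1 : aLoop (l :: rest) i none [] = aLoop rest (i + 1) (some i) [l] := by
          simp only [aLoop, h, if_true, List.nil_append]
        unfold aPost
        rw [h1, aLoop_some]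
        by_cases hc : bRun rest = rest.length
        · rw [if_pos hc]
          simp only [List.singleton_append, List.length_cons, hlen]
          rw [show i + (rest.length + 1) = i + 1 + bRun rest from by omega]
        · rw [if_neg hc]
          simp only [List.singleton_append, hlen]
      have hB : bPost (l :: rest) i =
          (if bRun rest + 1 < 2 then none
           else some (l :: rest.take (bRun rest), (i : Int), ((i + (bRun rest + 1) : Nat) : Int))) := by
        have h1 : bStart (l :: rest) i = some i := by
          simp only [bStart]; rw [if_pos h]
        have h2 : bRun (l :: rest) = bRun rest + 1 := by
          simp only [bRun]; rw [if_pos h]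
        unfold bPost
        rw [h1]
        simp only [Nat.sub_self, List.drop_zero, h2, List.take_succ_cons]
      rw [hA, hB]
      split_ifs with hx
      · rfl
      · simp only [Option.some.injEq, Prod.mk.injEq]
        refine ⟨by trivial, by trivial, ?_⟩
        omega
    · -- non-table line before any table row: both sides skip it
      have ha : aPost (l :: rest) i = aPost rest (i + 1) := by
        have h1 : aLoop (l :: rest) i none [] = aLoop rest (i + 1) none [] := by
          simp only [aLoop]; rw [if_neg h]
        unfold aPost
        rw [h1]
        rw [show (l :: rest).length = rest.length + 1 from by simp]
        rw [show i + (rest.length + 1) = i + 1 + rest.length from by omega]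
      have hb : bPost (l :: rest) i = bPost rest (i + 1) := by
        have h1 : bStart (l :: rest) i = bStart rest (i + 1) := by
          simp only [bStart]; rw [if_neg h]
        unfold bPost
        rw [h1]
        cases hs : bStart rest (i + 1) with
        | none => rfl
        | some s =>
          have hle := bStart_le rest (i + 1) s hs
          simp only [show s - i = (s - (i + 1)) + 1 from by omega, List.drop_succ_cons]
      rw [ha, hb, ih]

-- ===== VERDICT (by name: the statement is the Claim_ definition above) =====
theorem find_first_markdown_table_py_spec : Claim_equal_find_first_markdown_table_py := by
  intro markdown _
  show find_first_markdown_table_py markdown = find_first_markdown_table_py_alt markdown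
  have h := aPost_eq_bPost (PySem.Str.splitlines markdown) 0
  simpa [aPost, bPost, find_first_markdown_table_py, find_first_markdown_table_py_alt] using h
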